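-- pv_equiv track=rewrite | github.com/AnthonyOfSeattle/Phosphopedia | integration_engine/protein_grouper.py | _build_missed_cleavages
-- ===== SOURCE A (Python) =====
-- def _build_missed_cleavages(seq_list, group_size):
--     if group_size > len(seq_list):
--         return []
--
--     args = [iter(seq_list) for i in range(group_size)]
--     for ind, it in enumerate(args):
--         for i in range(ind):
--             next(it)
--
--     return ["".join(peps) for peps in zip(*args)]
-- ===== SOURCE B (Python) =====
-- def _build_missed_cleavages(seq_list, group_size):
--     n = len(seq_list)
--     if group_size <= 0 or group_size > n:
--         return []
--     return ["".join(seq_list[i:i + group_size]) for i in range(n - group_size + 1)]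
-- ===== Notes on version B (the rewrite author's own statement) =====
-- stated objective: simpler
-- what changed: Replaces the iterator-offset + zip(*args) trick with a direct loop over window start indices, joining each slice seq_list[i:i+group_size].
import Mathlib
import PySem

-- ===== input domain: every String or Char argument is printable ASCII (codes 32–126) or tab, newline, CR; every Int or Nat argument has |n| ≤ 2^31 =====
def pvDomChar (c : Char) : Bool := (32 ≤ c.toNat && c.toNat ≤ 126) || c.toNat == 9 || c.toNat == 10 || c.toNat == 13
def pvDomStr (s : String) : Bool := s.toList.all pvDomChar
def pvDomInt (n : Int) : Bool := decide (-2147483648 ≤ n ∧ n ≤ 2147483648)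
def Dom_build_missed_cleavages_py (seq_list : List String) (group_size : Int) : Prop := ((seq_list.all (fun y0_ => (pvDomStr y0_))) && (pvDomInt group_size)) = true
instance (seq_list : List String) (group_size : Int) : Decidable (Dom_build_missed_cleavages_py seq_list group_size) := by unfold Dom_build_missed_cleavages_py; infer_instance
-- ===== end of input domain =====

-- B replaces A's iterator-offset + zip(*args) trick by a direct loop over window
-- start indices joining each slice (objective: simpler).

-- ===== PORT A =====
-- zip(*args) over a list of iterators, each iterator modelled as its remaining list:
-- emit the heads while every iterator is nonempty (zip() with no iterators yields nothing).
def pyZipAll (ls : List (List String)) : List (List String) :=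
  if h : ls ≠ [] ∧ ls.all (fun l => !l.isEmpty) then
    (ls.map (fun l => l.headD "")) :: pyZipAll (ls.map List.tail)
  else []
termination_by (ls.headD []).length
decreasing_by
  obtain ⟨hne, hall⟩ := h
  cases ls with
  | nil => exact absurd rfl hne
  | cons a rest =>
    have ha : a ≠ [] := by
      have := List.all_eq_true.mp hall a (List.mem_cons_self)
      simpa using this
    simp only [List.map_cons, List.headD_cons]
    cases a with
    | nil => exact absurd rfl ha
    | cons x xs => simp

-- iterator number i of args has been advanced i times by next(it), i.e. is seq_list with
-- its first i elements consumed
def build_missed_cleavages_py (seq_list : List String) (group_size : Int) : List String :=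
  if group_size > (seq_list.length : Int) then []
  else
    let args := (PySem.List.pyRange 0 group_size).map (fun i => seq_list.drop i.toNat)
    (pyZipAll args).map (fun peps => PySem.Str.join "" peps)

-- ===== PORT B =====
def build_missed_cleavages_py_alt (seq_list : List String) (group_size : Int) : List String :=
  if group_size ≤ 0 ∨ group_size > (seq_list.length : Int) then []
  else
    (PySem.List.pyRange 0 ((seq_list.length : Int) - group_size + 1)).map
      (fun i => PySem.Str.join "" (PySem.List.slice seq_list (some i) (some (i + group_size))))

-- ===== PRECONDITION & SPEC =====
def Spec_build_missed_cleavages_py (seq_list : List String) (group_size : Int) (out : List String) : Prop := out = build_missed_cleavages_py_alt seq_list group_size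
instance (seq_list : List String) (group_size : Int) (out : List String) : Decidable (Spec_build_missed_cleavages_py seq_list group_size out) := by unfold Spec_build_missed_cleavages_py; infer_instance

-- ===== CLAIM (what is proved, stated in full; the proofs are below) =====
def Claim_equal_build_missed_cleavages_py : Prop := ∀ (seq_list : List String) (group_size : Int), Dom_build_missed_cleavages_py seq_list group_size → Spec_build_missed_cleavages_py seq_list group_size (build_missed_cleavages_py seq_list group_size)

-- ===== LEMMAS AND PROOFS =====

theorem pyZipAll_nil : pyZipAll [] = [] := by
  unfold pyZipAll; simp

theorem pyZipAll_of_mem_nil {ls : List (List String)} (h : [] ∈ ls) : pyZipAll ls = [] := by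
  unfold pyZipAll
  rw [dif_neg]
  rintro ⟨-, hall⟩
  have := List.all_eq_true.mp hall [] h
  simp at this

theorem headD_drop {s : List String} {i : Nat} (h : i < s.length) :
    (s.drop i).headD "" = s[i] := by
  rw [List.drop_eq_getElem_cons h]
  rw [List.headD_cons]

theorem heads_eq_take {s : List String} {g : Nat} (h : g ≤ s.length) :
    (List.range g).map (fun i => (s.drop i).headD "") = s.take g := by
  apply List.ext_getElem
  · simp; omega
  · intro i h1 h2
    simp only [List.getElem_map, List.getElem_range, List.getElem_take]
    have hi : i < s.length := by simp at h1; omega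
    exact headD_drop hi

-- pyZipAll on the list of offset suffixes = the list of windows
theorem pyZipAll_drops (g : Nat) (hg : 1 ≤ g) :
    ∀ (s : List String), g ≤ s.length →
      pyZipAll ((List.range g).map (fun i => s.drop i)) =
        (List.range (s.length + 1 - g)).map (fun j => (s.drop j).take g) := by
  intro s
  induction s with
  | nil => intro h; simp at h; omega
  | cons a rest ih =>
    intro h
    have hcond : ((List.range g).map (fun i => (a :: rest).drop i)) ≠ [] ∧
        ((List.range g).map (fun i => (a :: rest).drop i)).all (fun l => !l.isEmpty) := by
      constructor
      · simp; omega
      · rw [List.all_eq_true]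
        intro l hl
        simp only [List.mem_map, List.mem_range] at hl
        obtain ⟨i, hi, rfl⟩ := hl
        have hne : (a :: rest).drop i ≠ [] := by
          rw [ne_eq, List.drop_eq_nil_iff]
          simp only [List.length_cons] at h ⊢
          omega
        simpa using hne
    rw [pyZipAll, dif_pos hcond]
    have hheads : ((List.range g).map (fun i => (a :: rest).drop i)).map (fun l => l.headD "") =
        (a :: rest).take g := by
      rw [List.map_map]
      exact heads_eq_take h
    have htails : ((List.range g).map (fun i => (a :: rest).drop i)).map List.tail =
        (List.range g).map (fun i => rest.drop i) := by
      rw [List.map_map]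
      apply List.map_congr_left
      intro i _
      simp only [Function.comp_apply]
      rw [List.tail_drop, List.drop_succ_cons]
    rw [hheads, htails]
    by_cases hr : g ≤ rest.length
    · rw [ih hr]
      have hlen : (a :: rest).length + 1 - g = (rest.length + 1 - g) + 1 := by
        simp; omega
      rw [hlen, List.range_succ_eq_map, List.map_cons, List.map_map]
      congr 1
    · -- last iterator is exhausted after this step: one window only
      have hg' : g = rest.length + 1 := by simp at h; omega
      have hmem : [] ∈ (List.range g).map (fun i => rest.drop i) := by
        simp only [List.mem_map, List.mem_range]
        exact ⟨rest.length, by omega, by simp⟩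
      rw [pyZipAll_of_mem_nil hmem]
      have : (a :: rest).length + 1 - g = 1 := by simp; omega
      rw [this]
      simp

theorem build_missed_cleavages_py_eq (seq_list : List String) (group_size : Int) :
    build_missed_cleavages_py seq_list group_size =
      build_missed_cleavages_py_alt seq_list group_size := by
  unfold build_missed_cleavages_py build_missed_cleavages_py_alt
  by_cases hbig : group_size > (seq_list.length : Int)
  · rw [if_pos hbig, if_pos (Or.inr hbig)]
  · rw [if_neg hbig]
    by_cases hle : group_size ≤ 0
    · -- empty iterator list: zip() yields nothing
      rw [if_pos (Or.inl hle)]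
      rw [PySem.List.pyRange_one_eq_nil hle]
      simp [pyZipAll_nil]
    · rw [if_neg (by push_neg; push_neg at hle hbig; exact ⟨hle, hbig⟩ : ¬(group_size ≤ 0 ∨ group_size > (seq_list.length : Int)))]
      push_neg at hle hbig
      set g : Nat := group_size.toNat with hgdef
      have hgs : group_size = (g : Int) := by omega
      have hg1 : 1 ≤ g := by omega
      have hgl : g ≤ seq_list.length := by omega
      -- A side
      have hargs : (PySem.List.pyRange 0 group_size).map (fun i => seq_list.drop i.toNat) =
          (List.range g).map (fun i => seq_list.drop i) := by
        rw [hgs, PySem.List.pyRange_zero_natCast, List.map_map]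
        apply List.map_congr_left
        intro k _
        simp
      rw [hargs]
      show (pyZipAll ((List.range g).map (fun i => seq_list.drop i))).map
          (fun peps => PySem.Str.join "" peps) = _
      rw [pyZipAll_drops g hg1 seq_list hgl]
      -- B side
      have hcnt : (seq_list.length : Int) - group_size + 1 = ((seq_list.length + 1 - g : Nat) : Int) := by
        omega
      rw [hcnt, PySem.List.pyRange_zero_natCast, List.map_map, List.map_map]
      apply List.map_congr_left
      intro j _
      simp only [Function.comp_apply]
      congr 1
      rw [hgs, PySem.List.slice_natCast_add]

-- ===== VERDICT (by name: the statement is the Claim_ definition above) =====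
theorem build_missed_cleavages_py_spec : Claim_equal_build_missed_cleavages_py := by
  intro seq_list group_size _
  unfold Spec_build_missed_cleavages_py
  exact build_missed_cleavages_py_eq seq_list group_size
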